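-- pv_equiv track=rewrite | github.com/midsphere-ai/exo | packages/exo-eval/src/exo/eval/scorers.py | _check_csv
-- ===== SOURCE A (Python) =====
-- from typing import Any, ClassVar
--
-- def _check_csv(text: str) -> tuple[bool, dict[str, Any]]:
--     lines = [ln for ln in text.strip().splitlines() if ln.strip()]
--     if len(lines) < 2:
--         return False, {"error": "CSV requires at least a header and one data row"}
--     delimiters = [",", "\t", ";", "|"]
--     for delim in delimiters:
--         counts = [ln.count(delim) for ln in lines]
--         if counts[0] > 0 and all(c == counts[0] for c in counts):
--             return True, {"delimiter": delim}
--     return False, {"error": "Inconsistent column counts across rows"}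
-- ===== SOURCE B (Python) =====
-- def _check_csv(text: str):
--     lines = [ln for ln in text.strip().splitlines() if ln.strip()]
--     if len(lines) < 2:
--         return False, {"error": "CSV requires at least a header and one data row"}
--     # One character-level scan per line tallies all four delimiters at once;
--     # per delimiter we accumulate the SET of distinct per-line counts.
--     seen = {",": set(), "\t": set(), ";": set(), "|": set()}
--     for ln in lines:
--         tally = {",": 0, "\t": 0, ";": 0, "|": 0}
--         for ch in ln:
--             if ch in tally:
--                 tally[ch] += 1
--         for d in seen:
--             seen[d].add(tally[d])
--     # consistent delimiter = exactly one distinct count, and it is not 0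
--     for d in [",", "\t", ";", "|"]:
--         if len(seen[d]) == 1 and 0 not in seen[d]:
--             return True, {"delimiter": d}
--     return False, {"error": "Inconsistent column counts across rows"}
-- ===== Notes on version B (the rewrite author's own statement) =====
-- stated objective: alternative
-- what changed: B replaces A's per-delimiter rescans (str.count per delimiter, early exit) by one character-level scan per line that tallies all four delimiters at once and accumulates, per delimiter, the SET of distinct per-line counts; a delimiter is consistent iff its set is a singleton not containing 0, checked afterwards in priority order.
import Mathlib
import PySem

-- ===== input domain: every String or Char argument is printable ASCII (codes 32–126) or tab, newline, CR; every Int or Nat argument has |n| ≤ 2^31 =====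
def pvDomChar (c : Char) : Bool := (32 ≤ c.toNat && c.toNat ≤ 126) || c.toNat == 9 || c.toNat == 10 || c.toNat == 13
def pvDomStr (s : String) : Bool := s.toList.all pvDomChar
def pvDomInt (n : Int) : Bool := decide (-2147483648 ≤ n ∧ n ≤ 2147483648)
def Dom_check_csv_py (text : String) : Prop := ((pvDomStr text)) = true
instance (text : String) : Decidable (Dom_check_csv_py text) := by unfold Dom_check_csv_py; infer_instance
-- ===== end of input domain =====

-- B replaces A's per-delimiter rescans (str.count per delimiter with early exit) by one
-- character scan per line tallying all four delimiters at once, collecting per delimiter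
-- the set of distinct per-line counts; a delimiter is consistent iff its set is a
-- singleton not containing 0 (alternative algorithm/data structure, same exact result).

-- ===== PORT A =====
-- the 'for delim in delimiters' loop with early return
def checkDelimsA (lines : List String) : List String → Bool × (List (String × String))
  | [] => (false, [("error", "Inconsistent column counts across rows")])
  | d :: ds =>
    let counts := lines.map (fun ln => PySem.Str.count ln d)
    let c0 := counts.headD 0
    if decide (0 < c0) && counts.all (fun c => c == c0) then (true, [("delimiter", d)])
    else checkDelimsA lines ds

def check_csv_py (text : String) : Bool × (List (String × String)) :=
  let lines := (PySem.Str.splitlines (PySem.Str.strip text)).filter (fun ln => PySem.Str.strip ln != "")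
  if lines.length < 2 then (false, [("error", "CSV requires at least a header and one data row")])
  else checkDelimsA lines [",", "\t", ";", "|"]

-- ===== PORT B =====
-- the inner 'for ch in ln' loop: one scan tallying the four delimiters simultaneously
def csvTally (ln : List Char) : Nat × Nat × Nat × Nat :=
  ln.foldl (fun t c =>
    if c == ',' then (t.1 + 1, t.2.1, t.2.2.1, t.2.2.2)
    else if c == '\t' then (t.1, t.2.1 + 1, t.2.2.1, t.2.2.2)
    else if c == ';' then (t.1, t.2.1, t.2.2.1 + 1, t.2.2.2)
    else if c == '|' then (t.1, t.2.1, t.2.2.1, t.2.2.2 + 1)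
    else t) (0, 0, 0, 0)

def check_csv_py_alt (text : String) : Bool × (List (String × String)) :=
  let lines := (PySem.Str.splitlines (PySem.Str.strip text)).filter (fun ln => PySem.Str.strip ln != "")
  if lines.length < 2 then (false, [("error", "CSV requires at least a header and one data row")])
  else
    -- the 'for ln in lines' loop: per-delimiter sets of distinct per-line counts
    let seen := lines.foldl
      (fun (s : PySem.Set Nat × PySem.Set Nat × PySem.Set Nat × PySem.Set Nat) ln =>
        let t := csvTally ln.toList
        (PySem.Set.add s.1 t.1, PySem.Set.add s.2.1 t.2.1,
         PySem.Set.add s.2.2.1 t.2.2.1, PySem.Set.add s.2.2.2 t.2.2.2))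
      (PySem.Set.empty, PySem.Set.empty, PySem.Set.empty, PySem.Set.empty)
    if (PySem.Set.len seen.1 == 1) && !(PySem.Set.contains seen.1 0) then
      (true, [("delimiter", ",")])
    else if (PySem.Set.len seen.2.1 == 1) && !(PySem.Set.contains seen.2.1 0) then
      (true, [("delimiter", "\t")])
    else if (PySem.Set.len seen.2.2.1 == 1) && !(PySem.Set.contains seen.2.2.1 0) then
      (true, [("delimiter", ";")])
    else if (PySem.Set.len seen.2.2.2 == 1) && !(PySem.Set.contains seen.2.2.2 0) then
      (true, [("delimiter", "|")])
    else (false, [("error", "Inconsistent column counts across rows")])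

-- ===== PRECONDITION & SPEC =====
def Spec_check_csv_py (text : String) (out : Bool × (List (String × String))) : Prop := out = check_csv_py_alt text
instance (text : String) (out : Bool × (List (String × String))) : Decidable (Spec_check_csv_py text out) := by unfold Spec_check_csv_py; infer_instance

-- ===== CLAIM (what is proved, stated in full; the proofs are below) =====
def Claim_equal_check_csv_py : Prop := ∀ (text : String), Dom_check_csv_py text → Spec_check_csv_py text (check_csv_py text)

-- ===== LEMMAS AND PROOFS =====

-- PySem.Chars.count of a single-character pattern is List.count of that character
theorem chars_count_go_single (c : Char) (l : List Char) (fuel acc : Nat) (h : l.length ≤ fuel) :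
    PySem.Chars.count.go [c] fuel l acc = acc + l.count c := by
  induction l generalizing fuel acc with
  | nil => cases fuel <;> simp [PySem.Chars.count.go]
  | cons x xs ih =>
    cases fuel with
    | zero => simp at h
    | succ n =>
      simp only [PySem.Chars.count.go]
      rw [List.length_cons] at h
      by_cases hx : c = x
      · subst hx
        rw [if_pos (by simp [List.isPrefixOf])]
        have hdrop : List.drop ([c].length) (c :: xs) = xs := rfl
        rw [hdrop, ih n (acc + 1) (by omega), List.count_cons_self]
        omega
      · rw [if_neg (by simp [List.isPrefixOf]; exact hx)]
        rw [ih n acc (by omega)]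
        simp [List.count_cons]
        exact fun hh => hx hh.symm

theorem chars_count_single (c : Char) (l : List Char) :
    PySem.Chars.count l [c] = l.count c := by
  have h0 : PySem.Chars.count l [c] = PySem.Chars.count.go [c] l.length l 0 := rfl
  rw [h0, chars_count_go_single c l l.length 0 le_rfl, Nat.zero_add]

theorem str_count_comma (s : String) : PySem.Str.count s "," = s.toList.count ',' := by
  rw [PySem.Str.count_eq]; exact chars_count_single ',' s.toList
theorem str_count_tab (s : String) : PySem.Str.count s "\t" = s.toList.count '\t' := by
  rw [PySem.Str.count_eq]; exact chars_count_single '\t' s.toList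
theorem str_count_semi (s : String) : PySem.Str.count s ";" = s.toList.count ';' := by
  rw [PySem.Str.count_eq]; exact chars_count_single ';' s.toList
theorem str_count_pipe (s : String) : PySem.Str.count s "|" = s.toList.count '|' := by
  rw [PySem.Str.count_eq]; exact chars_count_single '|' s.toList

-- B's single character scan computes the four character counts
theorem csvTally_go (l : List Char) (a b c d : Nat) :
    l.foldl (fun t (ch : Char) =>
      if ch == ',' then (t.1 + 1, t.2.1, t.2.2.1, t.2.2.2)
      else if ch == '\t' then (t.1, t.2.1 + 1, t.2.2.1, t.2.2.2)
      else if ch == ';' then (t.1, t.2.1, t.2.2.1 + 1, t.2.2.2)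
      else if ch == '|' then (t.1, t.2.1, t.2.2.1, t.2.2.2 + 1)
      else t) (a, b, c, d)
    = (a + l.count ',', b + l.count '\t', c + l.count ';', d + l.count '|') := by
  induction l generalizing a b c d with
  | nil => simp
  | cons x xs ih =>
    rw [List.foldl_cons]
    by_cases h1 : x = ','
    · subst h1
      simp only [BEq.rfl, if_true, ih]
      simp [Prod.ext_iff]
      omega
    · by_cases h2 : x = '\t'
      · subst h2
        simp only [show (('\t' : Char) == ',') = false by decide, BEq.rfl, if_true, ih]
        simp [Prod.ext_iff]
        omega
      · by_cases h3 : x = ';'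
        · subst h3
          simp only [show ((';' : Char) == ',') = false by decide,
            show ((';' : Char) == '\t') = false by decide, BEq.rfl, if_true, ih]
          simp [Prod.ext_iff]
          omega
        · by_cases h4 : x = '|'
          · subst h4
            simp only [show (('|' : Char) == ',') = false by decide,
              show (('|' : Char) == '\t') = false by decide,
              show (('|' : Char) == ';') = false by decide, BEq.rfl, if_true, ih]
            simp [Prod.ext_iff]
            omega
          · rw [if_neg (by simp [h1]), if_neg (by simp [h2]), if_neg (by simp [h3]),
                if_neg (by simp [h4]), ih]
            simp [List.count_cons, Prod.ext_iff]
            exact ⟨h1, h2, h3, h4⟩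

theorem csvTally_eq (l : List Char) :
    csvTally l = (l.count ',', l.count '\t', l.count ';', l.count '|') := by
  unfold csvTally
  rw [csvTally_go]
  simp

-- the quadruple set-building fold splits into four independent folds
theorem foldQuad (f1 f2 f3 f4 : String → Nat) (lines : List String)
    (s1 s2 s3 s4 : PySem.Set Nat) :
    lines.foldl (fun (s : PySem.Set Nat × PySem.Set Nat × PySem.Set Nat × PySem.Set Nat) ln =>
        (PySem.Set.add s.1 (f1 ln), PySem.Set.add s.2.1 (f2 ln),
         PySem.Set.add s.2.2.1 (f3 ln), PySem.Set.add s.2.2.2 (f4 ln))) (s1, s2, s3, s4)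
    = (lines.foldl (fun s ln => PySem.Set.add s (f1 ln)) s1,
       lines.foldl (fun s ln => PySem.Set.add s (f2 ln)) s2,
       lines.foldl (fun s ln => PySem.Set.add s (f3 ln)) s3,
       lines.foldl (fun s ln => PySem.Set.add s (f4 ln)) s4) := by
  induction lines generalizing s1 s2 s3 s4 with
  | nil => rfl
  | cons x xs ih => rw [List.foldl_cons]; exact ih _ _ _ _

theorem fold_add_eq_ofList (f : String → Nat) (lines : List String) :
    lines.foldl (fun s ln => PySem.Set.add s (f ln)) PySem.Set.empty
    = PySem.Set.ofList (lines.map f) := by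
  rw [PySem.Set.ofList_eq_foldl, List.foldl_map]
  rfl

-- ofList of a list whose elements all equal its head collapses to a singleton
theorem ofList_all_eq (n0 : Nat) (rest : List Nat) (h : ∀ x ∈ rest, x = n0) :
    PySem.Set.ofList (n0 :: rest) = [n0] := by
  rw [PySem.Set.ofList_eq_foldl, List.foldl_cons]
  have hadd : PySem.Set.add ([] : PySem.Set Nat) n0 = [n0] := rfl
  rw [hadd]
  induction rest with
  | nil => rfl
  | cons x xs ih =>
    rw [List.foldl_cons]
    have hx : x = n0 := h x (by simp)
    subst hx
    have h2 : PySem.Set.add [x] x = [x] := by simp [PySem.Set.add, PySem.Set.contains]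
    rw [h2]
    exact ih (fun y hy => h y (by simp [hy]))

-- the singleton-set test over the counts list IS "head count > 0 and all counts equal it"
theorem set_cond_eq (n0 : Nat) (rest : List Nat) :
    ((PySem.Set.len (PySem.Set.ofList (n0 :: rest)) == 1)
      && !(PySem.Set.contains (PySem.Set.ofList (n0 :: rest)) 0))
    = (decide (0 < n0) && rest.all (fun x => x == n0)) := by
  by_cases h : ∀ x ∈ rest, x = n0
  · rw [ofList_all_eq n0 rest h]
    have hall : rest.all (fun x => x == n0) = true := by
      simp only [List.all_eq_true, beq_iff_eq]; exact h
    rw [hall, Bool.and_true]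
    cases n0 <;> simp [PySem.Set.len, PySem.Set.contains]
  · have hne : ∃ x ∈ rest, x ≠ n0 := by
      by_contra hc
      push Not at hc
      exact h (fun x hx => hc x hx)
    obtain ⟨x, hx, hxne⟩ := hne
    have hlen : (PySem.Set.len (PySem.Set.ofList (n0 :: rest)) == 1) = false := by
      rw [beq_eq_false_iff_ne]
      intro hlen1
      have hlen1' : (PySem.Set.ofList (n0 :: rest)).length = 1 := by
        simpa [PySem.Set.len] using hlen1
      obtain ⟨y, hy⟩ := List.length_eq_one_iff.mp hlen1'
      have hm0 : n0 ∈ PySem.Set.ofList (n0 :: rest) := by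
        rw [PySem.Set.mem_ofList]; simp
      have hmx : x ∈ PySem.Set.ofList (n0 :: rest) := by
        rw [PySem.Set.mem_ofList]; simp [hx]
      rw [hy] at hm0 hmx
      simp at hm0 hmx
      exact hxne (hmx.trans hm0.symm)
    rw [hlen]
    have hall : rest.all (fun x => x == n0) = false := by
      simp only [List.all_eq_false]
      exact ⟨x, hx, by simpa using hxne⟩
    rw [hall]
    simp

-- A's per-delimiter condition over l0 :: rest reduces to 'header count > 0 and rest all match'
theorem countsA_cond (l0 : String) (rest : List String) (d : String) :
    (decide (0 < ((l0 :: rest).map (fun ln => PySem.Str.count ln d)).headD 0)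
      && ((l0 :: rest).map (fun ln => PySem.Str.count ln d)).all
           (fun c => c == ((l0 :: rest).map (fun ln => PySem.Str.count ln d)).headD 0))
    = (decide (0 < PySem.Str.count l0 d) && rest.all (fun ln => PySem.Str.count ln d == PySem.Str.count l0 d)) := by
  simp only [List.map_cons, List.headD_cons, List.all_cons, List.all_map, Function.comp_def, beq_self_eq_true, Bool.true_and]
  rfl

-- B's per-delimiter set condition reduces to the same expression
theorem B_cond (cnt : String → Nat) (l0 : String) (rest : List String) :
    ((PySem.Set.len (PySem.Set.ofList ((l0 :: rest).map cnt)) == 1)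
      && !(PySem.Set.contains (PySem.Set.ofList ((l0 :: rest).map cnt)) 0))
    = (decide (0 < cnt l0) && rest.all (fun ln => cnt ln == cnt l0)) := by
  rw [List.map_cons, set_cond_eq, List.all_map]
  rfl

-- ===== VERDICT (by name: the statement is the Claim_ definition above) =====
theorem check_csv_py_spec : Claim_equal_check_csv_py := by
  intro text _
  unfold Spec_check_csv_py check_csv_py check_csv_py_alt
  set lines := (PySem.Str.splitlines (PySem.Str.strip text)).filter (fun ln => PySem.Str.strip ln != "") with hl
  clear_value lines
  by_cases h2 : lines.length < 2
  · simp [h2]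
  · cases lines with
    | nil => exact absurd (by simp) h2
    | cons l0 rest =>
      rw [if_neg h2, if_neg h2]
      show checkDelimsA (l0 :: rest) [",", "\t", ";", "|"] = _
      rw [foldQuad (fun ln => (csvTally ln.toList).1) (fun ln => (csvTally ln.toList).2.1)
            (fun ln => (csvTally ln.toList).2.2.1) (fun ln => (csvTally ln.toList).2.2.2),
          fold_add_eq_ofList, fold_add_eq_ofList, fold_add_eq_ofList, fold_add_eq_ofList]
      simp only [csvTally_eq]
      rw [B_cond, B_cond, B_cond, B_cond]
      simp only [checkDelimsA]
      rw [countsA_cond, countsA_cond, countsA_cond, countsA_cond]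
      simp only [str_count_comma, str_count_tab, str_count_semi, str_count_pipe]
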